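-- pv_equiv track=rewrite | github.com/petrlos/AoC_2018 | 20/20.py | generateMaze
-- ===== SOURCE A (Python) =====
-- def tupleSum(a,b):
--     return tuple([x + y for x, y in zip(a,b)])
--
-- def generateMaze(regexPath):
--     directions = {"W":(-1,0), "E":(1,0), "N":(0,1), "S":(0,-1)}
--     maze = {(0,0):"X"}
--     currentPosition = (0,0) #start in the middle
--     lastInterception = []
--     for index, char in enumerate(regexPath):
--         if char in directions.keys(): #move in desired direction
--             currentPosition = tupleSum(currentPosition, directions[char])
--             maze[currentPosition] = "+" #set up door
--             currentPosition = tupleSum(currentPosition, directions[char])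
--             maze[currentPosition] = "." #set up room
--         elif char == "(": #intersection - save position
--             lastInterception.append(currentPosition)
--         elif char == "|": #go to last interception
--             currentPosition = lastInterception[-1]
--         elif char == ")": #branch closed, remove interception from list
--             lastInterception = lastInterception[:-1]
--     return maze
-- ===== SOURCE B (Python) =====
-- def generateMaze(regexPath):
--     directions = {"W": (-1, 0), "E": (1, 0), "N": (0, 1), "S": (0, -1)}
--     maze = {(0, 0): "X"}
--     n = len(regexPath)
--
--     def parse(i, pos, top):
--         # recursive-descent: consume chars from index i; `start` is this
--         # group's entry position; returns (next index, final position)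
--         start = pos
--         while i < n:
--             char = regexPath[i]
--             i += 1
--             if char in directions:
--                 dx, dy = directions[char]
--                 pos = (pos[0] + dx, pos[1] + dy)
--                 maze[pos] = "+"
--                 pos = (pos[0] + dx, pos[1] + dy)
--                 maze[pos] = "."
--             elif char == "(":
--                 i, pos = parse(i, pos, False)
--             elif char == "|":
--                 pos = start
--             elif char == ")":
--                 if not top:
--                     return i, pos
--                 # stray ')' at top level: nothing to close, ignore
--         return i, pos
--
--     parse(0, (0, 0), True)
--     return maze
-- ===== Notes on version B (the rewrite author's own statement) =====
-- stated objective: alternative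
-- what changed: A is a single flat loop driving an explicit stack of saved intersection positions; B is a recursive-descent parser whose call structure replaces the stack: each '(' becomes a recursive call carrying the group's start position, '|' resets to that start, ')' returns to the caller.
-- outside the precondition, e.g. on generateMaze('|'): A raises IndexError, B returns {(0, 0): 'X'}
import Mathlib
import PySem

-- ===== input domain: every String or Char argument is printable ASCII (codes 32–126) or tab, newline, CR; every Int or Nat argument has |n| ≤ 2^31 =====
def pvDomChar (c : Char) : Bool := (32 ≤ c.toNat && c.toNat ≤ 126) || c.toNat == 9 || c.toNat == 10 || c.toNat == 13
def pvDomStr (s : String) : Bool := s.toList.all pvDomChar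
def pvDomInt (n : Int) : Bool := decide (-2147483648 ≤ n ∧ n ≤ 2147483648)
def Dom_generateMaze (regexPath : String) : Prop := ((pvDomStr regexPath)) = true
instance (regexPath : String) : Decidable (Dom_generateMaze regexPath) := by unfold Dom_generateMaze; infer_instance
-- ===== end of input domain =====

-- B replaces A's explicit intersection stack by recursive descent (same cost); return-value equivalence.


-- ===== PORT A =====
-- directions dict as a lookup function ('char in directions.keys()' = isSome, 'directions[char]' = get); exact
def gmDir (c : Char) : Option (Int × Int) :=
  if c = 'W' then some (-1, 0)
  else if c = 'E' then some (1, 0)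
  else if c = 'N' then some (0, 1)
  else if c = 'S' then some (0, -1)
  else none

-- one iteration of A's for-loop; state = (maze, currentPosition, lastInterception)
def gmStepA (st : PySem.Dict (Int × Int) String × (Int × Int) × List (Int × Int)) (c : Char) :
    PySem.Dict (Int × Int) String × (Int × Int) × List (Int × Int) :=
  match gmDir c with
  | some d =>
      -- tupleSum inlined: componentwise sum of the two pairs; exact
      let p1 := (st.2.1.1 + d.1, st.2.1.2 + d.2)
      let m1 := st.1.insert p1 "+"
      let p2 := (p1.1 + d.1, p1.2 + d.2)
      (m1.insert p2 ".", p2, st.2.2)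
  | none =>
      if c = '(' then (st.1, st.2.1, st.2.2 ++ [st.2.1])
      else if c = '|' then
        -- lastInterception[-1]; IndexError on empty list is outside Pre_ (default never read under Pre_)
        (st.1, PySem.List.pyGetD st.2.2 (-1) st.2.1, st.2.2)
      else if c = ')' then (st.1, st.2.1, PySem.List.slice st.2.2 none (some (-1)))
      else st

def generateMaze (regexPath : String) : List (Int × Int × String) :=
  let final := (PySem.List.enumerate regexPath.toList 0).foldl (fun st ic => gmStepA st ic.2)
      (PySem.Dict.ofList [(((0 : Int), (0 : Int)), "X")], ((0 : Int), (0 : Int)), ([] : List (Int × Int)))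
  final.1.items.map (fun p => (p.1.1, p.1.2, p.2))

-- ===== PORT B =====
-- Source B's recursive-descent parse over the remaining characters; returns (rest, pos, maze).
-- `fuel` (initially the string length) is totality scaffolding only: each call consumes one
-- character before recursing, so fuel ≥ remaining length and the 0-case is never reached.
def gmParse : Nat → List Char → (Int × Int) → (Int × Int) → Bool →
    PySem.Dict (Int × Int) String → List Char × (Int × Int) × PySem.Dict (Int × Int) String
  | 0, cs, pos, _, _, maze => (cs, pos, maze)
  | _ + 1, [], pos, _, _, maze => ([], pos, maze)
  | fuel + 1, c :: rest, pos, start, top, maze =>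
    match gmDir c with
    | some d =>
        let p1 := (pos.1 + d.1, pos.2 + d.2)
        let p2 := (p1.1 + d.1, p1.2 + d.2)
        gmParse fuel rest p2 start top ((maze.insert p1 "+").insert p2 ".")
    | none =>
      if c = '(' then
        let r1 := gmParse fuel rest pos pos false maze
        gmParse fuel r1.1 r1.2.1 start top r1.2.2
      else if c = '|' then
        gmParse fuel rest start start top maze
      else if c = ')' then
        if top then
          -- stray ')' at top level: nothing to close, ignore
          gmParse fuel rest pos start top maze
        else (rest, pos, maze)
      else
        gmParse fuel rest pos start top maze

def generateMaze_alt (regexPath : String) : List (Int × Int × String) :=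
  let r := gmParse regexPath.toList.length regexPath.toList ((0 : Int), (0 : Int)) ((0 : Int), (0 : Int)) true
      (PySem.Dict.ofList [(((0 : Int), (0 : Int)), "X")])
  r.2.2.items.map (fun p => (p.1.1, p.1.2, p.2))

-- ===== PRECONDITION & SPEC =====
-- gmOk cs d = true  ⟺  no '|' occurs while A's intersection stack (depth d, floored at 0) is empty
def gmOk : List Char → Nat → Bool
  | [], _ => true
  | c :: cs, d =>
      if c = '(' then gmOk cs (d + 1)
      else if c = ')' then gmOk cs (d - 1)
      else if c = '|' then d != 0 && gmOk cs d
      else gmOk cs d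

-- Pre_ excludes exactly the inputs on which A raises IndexError: a '|' with no enclosing open '('
def Pre_generateMaze (regexPath : String) : Prop := gmOk regexPath.toList 0 = true
instance (regexPath : String) : Decidable (Pre_generateMaze regexPath) := by unfold Pre_generateMaze; infer_instance
def pvWitness_generateMaze : String := "^ENWWW(NEEE|SSE(EE|N))$"

def Spec_generateMaze (regexPath : String) (out : List (Int × Int × String)) : Prop := out = generateMaze_alt regexPath
instance (regexPath : String) (out : List (Int × Int × String)) : Decidable (Spec_generateMaze regexPath out) := by unfold Spec_generateMaze; infer_instance

-- ===== CLAIM (what is proved, stated in full; the proofs are below) =====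
def Claim_equal_generateMaze : Prop := ∀ (regexPath : String), Dom_generateMaze regexPath → Pre_generateMaze regexPath → Spec_generateMaze regexPath (generateMaze regexPath)

-- ===== LEMMAS AND PROOFS =====

theorem gmDir_some_ne {c : Char} {d : Int × Int} (h : gmDir c = some d) :
    c ≠ '(' ∧ c ≠ ')' ∧ c ≠ '|' := by
  unfold gmDir at h
  split_ifs at h <;> subst_vars <;> refine ⟨by decide, by decide, by decide⟩

theorem gmParse_len : ∀ (f : Nat) (cs : List Char) (pos start : Int × Int) (top : Bool)
    (maze : PySem.Dict (Int × Int) String),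
    (gmParse f cs pos start top maze).1.length ≤ cs.length := by
  intro f
  induction f with
  | zero => intro cs pos start top maze; simp [gmParse]
  | succ f ih =>
    intro cs pos start top maze
    match cs with
    | [] => simp [gmParse]
    | c :: rest =>
      simp only [gmParse]
      cases h : gmDir c with
      | some d =>
        exact Nat.le_trans (ih ..) (Nat.le_succ _)
      | none =>
        by_cases h1 : c = '('
        · simp only [if_pos h1]
          exact Nat.le_trans (ih ..) (Nat.le_trans (ih ..) (Nat.le_succ _))
        · by_cases h2 : c = '|'
          · simp only [if_neg h1, if_pos h2]
            exact Nat.le_trans (ih ..) (Nat.le_succ _)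
          · by_cases h3 : c = ')'
            · simp only [if_neg h1, if_neg h2, if_pos h3]
              cases top
              · simp
              · exact Nat.le_trans (ih ..) (Nat.le_succ _)
            · simp only [if_neg h1, if_neg h2, if_neg h3]
              exact Nat.le_trans (ih ..) (Nat.le_succ _)

theorem gmParse_frame : ∀ (f : Nat) (cs : List Char), cs.length ≤ f →
    ∀ (pos start : Int × Int) (maze : PySem.Dict (Int × Int) String),
    ∃ pre : List Char,
      cs = pre ++ (gmParse f cs pos start false maze).1 ∧
      (∀ d : Nat, gmOk cs (d + 1) = true → gmOk (gmParse f cs pos start false maze).1 d = true) ∧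
      ((∀ S : List (Int × Int),
          List.foldl gmStepA (maze, pos, S ++ [start]) pre
            = ((gmParse f cs pos start false maze).2.2, (gmParse f cs pos start false maze).2.1, S))
        ∨ ((gmParse f cs pos start false maze).1 = [] ∧
           ∀ S : List (Int × Int), ∃ S',
             List.foldl gmStepA (maze, pos, S ++ [start]) pre
               = ((gmParse f cs pos start false maze).2.2, (gmParse f cs pos start false maze).2.1, S'))) := by
  intro f
  induction f with
  | zero =>
    intro cs hlen pos start maze
    have hnil : cs = [] := List.eq_nil_of_length_eq_zero (Nat.le_zero.mp hlen)
    subst hnil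
    exact ⟨[], by simp [gmParse], fun _ _ => rfl, Or.inr ⟨by simp [gmParse],
      fun S => ⟨S ++ [start], by simp [gmParse]⟩⟩⟩
  | succ f ih =>
    intro cs hlen pos start maze
    match cs with
    | [] =>
      exact ⟨[], by simp [gmParse], fun _ _ => rfl, Or.inr ⟨by simp [gmParse],
        fun S => ⟨S ++ [start], by simp [gmParse]⟩⟩⟩
    | c :: rest =>
      have hrest : rest.length ≤ f := by simp at hlen; omega
      cases hdir : gmDir c with
      | some d =>
        obtain ⟨hne1, hne3, hne2⟩ := gmDir_some_ne hdir
        have hstep : gmParse (f + 1) (c :: rest) pos start false maze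
            = gmParse f rest (pos.1 + d.1 + d.1, pos.2 + d.2 + d.2) start false
                ((maze.insert (pos.1 + d.1, pos.2 + d.2) "+").insert
                  (pos.1 + d.1 + d.1, pos.2 + d.2 + d.2) ".") := by
          simp [gmParse, hdir]
        have hokc : ∀ d' : Nat, gmOk (c :: rest) d' = gmOk rest d' := by
          intro d'; simp [gmOk, hne1, hne2, hne3]
        obtain ⟨pre, heq, hok, hdisj⟩ := ih rest hrest (pos.1 + d.1 + d.1, pos.2 + d.2 + d.2) start
            ((maze.insert (pos.1 + d.1, pos.2 + d.2) "+").insert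
              (pos.1 + d.1 + d.1, pos.2 + d.2 + d.2) ".")
        have hA : ∀ S : List (Int × Int), gmStepA (maze, pos, S) c
            = ((maze.insert (pos.1 + d.1, pos.2 + d.2) "+").insert
                (pos.1 + d.1 + d.1, pos.2 + d.2 + d.2) ".",
               (pos.1 + d.1 + d.1, pos.2 + d.2 + d.2), S) := by
          intro S; simp [gmStepA, hdir]
        refine ⟨c :: pre, ?_, ?_, ?_⟩
        · rw [hstep]; simpa using heq
        · intro d' h; rw [hstep]; exact hok d' ((hokc (d' + 1)) ▸ h)
        · rw [hstep]
          rcases hdisj with h | ⟨hnil, h⟩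
          · exact Or.inl fun S => by rw [List.foldl_cons, hA]; exact h S
          · refine Or.inr ⟨hnil, fun S => ?_⟩
            obtain ⟨S', hh⟩ := h S
            exact ⟨S', by rw [List.foldl_cons, hA]; exact hh⟩
      | none =>
        by_cases h1 : c = '('
        · subst h1
          have hstep : gmParse (f + 1) ('(' :: rest) pos start false maze
              = gmParse f (gmParse f rest pos pos false maze).1
                  (gmParse f rest pos pos false maze).2.1 start false
                  (gmParse f rest pos pos false maze).2.2 := by
            simp [gmParse, gmDir]
          obtain ⟨pre1, heq1, hok1, hd1⟩ := ih rest hrest pos pos maze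
          have hlen1 : (gmParse f rest pos pos false maze).1.length ≤ f :=
            Nat.le_trans (gmParse_len ..) hrest
          obtain ⟨pre2, heq2, hok2, hd2⟩ := ih (gmParse f rest pos pos false maze).1 hlen1
              (gmParse f rest pos pos false maze).2.1 start (gmParse f rest pos pos false maze).2.2
          have hA : ∀ S : List (Int × Int), gmStepA (maze, pos, S) '(' = (maze, pos, S ++ [pos]) := by
            intro S; simp [gmStepA, gmDir]
          refine ⟨'(' :: (pre1 ++ pre2), ?_, ?_, ?_⟩
          · rw [hstep]; simp only [List.cons_append, List.append_assoc]
            rw [← heq2, ← heq1]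
          · intro d h
            rw [hstep]
            have h' : gmOk rest (d + 1 + 1) = true := by simpa [gmOk] using h
            exact hok2 d (hok1 (d + 1) h')
          · rw [hstep]
            rcases hd1 with hL1 | ⟨hnil1, hE1⟩
            · rcases hd2 with hL2 | ⟨hnil2, hE2⟩
              · refine Or.inl fun S => ?_
                rw [List.foldl_cons, hA, List.foldl_append, hL1 (S ++ [start]), hL2 S]
              · refine Or.inr ⟨hnil2, fun S => ?_⟩
                obtain ⟨S', hh⟩ := hE2 S
                exact ⟨S', by rw [List.foldl_cons, hA, List.foldl_append, hL1 (S ++ [start]), hh]⟩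
            · have hpre2 : pre2 = [] := by
                have := heq2
                rw [hnil1] at this
                exact (List.append_eq_nil_iff.mp this.symm).1
              have hr2 : gmParse f (gmParse f rest pos pos false maze).1
                  (gmParse f rest pos pos false maze).2.1 start false
                  (gmParse f rest pos pos false maze).2.2
                  = ([], (gmParse f rest pos pos false maze).2.1,
                     (gmParse f rest pos pos false maze).2.2) := by
                rw [hnil1]; cases f <;> simp [gmParse]
              refine Or.inr ⟨by rw [hr2], fun S => ?_⟩
              obtain ⟨S', hh⟩ := hE1 (S ++ [start])
              refine ⟨S', ?_⟩
              rw [hpre2, List.append_nil, List.foldl_cons, hA, hh, hr2]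
        · by_cases h2 : c = '|'
          · subst h2
            have hstep : gmParse (f + 1) ('|' :: rest) pos start false maze
                = gmParse f rest start start false maze := by
              simp [gmParse, gmDir]
            have hA : ∀ S : List (Int × Int),
                gmStepA (maze, pos, S ++ [start]) '|' = (maze, start, S ++ [start]) := by
              intro S; simp [gmStepA, gmDir, PySem.List.pyGetD_neg_one_append_singleton]
            obtain ⟨pre, heq, hok, hdisj⟩ := ih rest hrest start start maze
            refine ⟨'|' :: pre, ?_, ?_, ?_⟩
            · rw [hstep]; simpa using heq
            · intro d h
              rw [hstep]
              exact hok d (by simpa [gmOk] using h)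
            · rw [hstep]
              rcases hdisj with h | ⟨hnil, h⟩
              · exact Or.inl fun S => by rw [List.foldl_cons, hA]; exact h S
              · refine Or.inr ⟨hnil, fun S => ?_⟩
                obtain ⟨S', hh⟩ := h S
                exact ⟨S', by rw [List.foldl_cons, hA]; exact hh⟩
          · by_cases h3 : c = ')'
            · subst h3
              have hstep : gmParse (f + 1) (')' :: rest) pos start false maze
                  = (rest, pos, maze) := by
                simp [gmParse, gmDir]
              refine ⟨[')'], by simp [hstep], ?_, ?_⟩
              · intro d h; rw [hstep]; simpa [gmOk] using h
              · refine Or.inl fun S => ?_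
                rw [hstep]
                simp [gmStepA, gmDir, PySem.List.slice_to_neg_one]
            · have hstep : gmParse (f + 1) (c :: rest) pos start false maze
                  = gmParse f rest pos start false maze := by
                simp [gmParse, hdir, h1, h2, h3]
              have hA : ∀ S : List (Int × Int), gmStepA (maze, pos, S) c = (maze, pos, S) := by
                intro S; simp [gmStepA, hdir, h1, h2, h3]
              obtain ⟨pre, heq, hok, hdisj⟩ := ih rest hrest pos start maze
              refine ⟨c :: pre, ?_, ?_, ?_⟩
              · rw [hstep]; simpa using heq
              · intro d h
                rw [hstep]
                exact hok d (by simpa [gmOk, h1, h2, h3] using h)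
              · rw [hstep]
                rcases hdisj with h | ⟨hnil, h⟩
                · exact Or.inl fun S => by rw [List.foldl_cons, hA]; exact h S
                · refine Or.inr ⟨hnil, fun S => ?_⟩
                  obtain ⟨S', hh⟩ := h S
                  exact ⟨S', by rw [List.foldl_cons, hA]; exact hh⟩

theorem gmParse_top : ∀ (f : Nat) (cs : List Char), cs.length ≤ f →
    ∀ (pos start : Int × Int) (maze : PySem.Dict (Int × Int) String), gmOk cs 0 = true →
    ∃ S' : List (Int × Int),
      List.foldl gmStepA (maze, pos, []) cs
        = ((gmParse f cs pos start true maze).2.2, (gmParse f cs pos start true maze).2.1, S') := by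
  intro f
  induction f with
  | zero =>
    intro cs hlen pos start maze _
    have hnil : cs = [] := List.eq_nil_of_length_eq_zero (Nat.le_zero.mp hlen)
    subst hnil
    exact ⟨[], by simp [gmParse]⟩
  | succ f ih =>
    intro cs hlen pos start maze hok
    match cs with
    | [] => exact ⟨[], by simp [gmParse]⟩
    | c :: rest =>
      have hrest : rest.length ≤ f := by simp at hlen; omega
      cases hdir : gmDir c with
      | some d =>
        obtain ⟨hne1, hne3, hne2⟩ := gmDir_some_ne hdir
        have hstep : gmParse (f + 1) (c :: rest) pos start true maze
            = gmParse f rest (pos.1 + d.1 + d.1, pos.2 + d.2 + d.2) start true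
                ((maze.insert (pos.1 + d.1, pos.2 + d.2) "+").insert
                  (pos.1 + d.1 + d.1, pos.2 + d.2 + d.2) ".") := by
          simp [gmParse, hdir]
        have hA : gmStepA (maze, pos, []) c
            = ((maze.insert (pos.1 + d.1, pos.2 + d.2) "+").insert
                (pos.1 + d.1 + d.1, pos.2 + d.2 + d.2) ".",
               (pos.1 + d.1 + d.1, pos.2 + d.2 + d.2), ([] : List (Int × Int))) := by
          simp [gmStepA, hdir]
        obtain ⟨S', hh⟩ := ih rest hrest (pos.1 + d.1 + d.1, pos.2 + d.2 + d.2) start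
            ((maze.insert (pos.1 + d.1, pos.2 + d.2) "+").insert
              (pos.1 + d.1 + d.1, pos.2 + d.2 + d.2) ".")
            (by simpa [gmOk, hne1, hne2, hne3] using hok)
        exact ⟨S', by rw [hstep, List.foldl_cons, hA]; exact hh⟩
      | none =>
        by_cases h1 : c = '('
        · subst h1
          have hstep : gmParse (f + 1) ('(' :: rest) pos start true maze
              = gmParse f (gmParse f rest pos pos false maze).1
                  (gmParse f rest pos pos false maze).2.1 start true
                  (gmParse f rest pos pos false maze).2.2 := by
            simp [gmParse, gmDir]
          have hA : gmStepA (maze, pos, []) '(' = (maze, pos, [pos]) := by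
            simp [gmStepA, gmDir]
          have hok1 : gmOk rest 1 = true := by simpa [gmOk] using hok
          obtain ⟨pre1, heq1, hoktr, hd1⟩ := gmParse_frame f rest hrest pos pos maze
          have hlen1 : (gmParse f rest pos pos false maze).1.length ≤ f :=
            Nat.le_trans (gmParse_len ..) hrest
          rcases hd1 with hL1 | ⟨hnil1, hE1⟩
          · obtain ⟨S', hh⟩ := ih (gmParse f rest pos pos false maze).1 hlen1
                (gmParse f rest pos pos false maze).2.1 start
                (gmParse f rest pos pos false maze).2.2 (hoktr 0 hok1)
            refine ⟨S', ?_⟩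
            have := hL1 ([] : List (Int × Int))
            rw [List.nil_append] at this
            rw [hstep, List.foldl_cons, hA]
            conv_lhs => rw [heq1]
            rw [List.foldl_append, this, hh]
          · have hr2 : gmParse f (gmParse f rest pos pos false maze).1
                (gmParse f rest pos pos false maze).2.1 start true
                (gmParse f rest pos pos false maze).2.2
                = ([], (gmParse f rest pos pos false maze).2.1,
                   (gmParse f rest pos pos false maze).2.2) := by
              rw [hnil1]; cases f <;> simp [gmParse]
            obtain ⟨S', hh⟩ := hE1 ([] : List (Int × Int))
            rw [List.nil_append] at hh
            refine ⟨S', ?_⟩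
            rw [hstep, List.foldl_cons, hA]
            conv_lhs => rw [heq1, hnil1, List.append_nil]
            rw [hh, hr2]
        · by_cases h2 : c = '|'
          · subst h2; simp [gmOk] at hok
          · by_cases h3 : c = ')'
            · subst h3
              have hstep : gmParse (f + 1) (')' :: rest) pos start true maze
                  = gmParse f rest pos start true maze := by
                simp [gmParse, gmDir]
              have hA : gmStepA (maze, pos, []) ')' = (maze, pos, []) := by
                simp [gmStepA, gmDir, PySem.List.slice_to_neg_one]
              obtain ⟨S', hh⟩ := ih rest hrest pos start maze (by simpa [gmOk] using hok)
              exact ⟨S', by rw [hstep, List.foldl_cons, hA]; exact hh⟩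
            · have hstep : gmParse (f + 1) (c :: rest) pos start true maze
                  = gmParse f rest pos start true maze := by
                simp [gmParse, hdir, h1, h2, h3]
              have hA : gmStepA (maze, pos, []) c = (maze, pos, []) := by
                simp [gmStepA, hdir, h1, h2, h3]
              obtain ⟨S', hh⟩ := ih rest hrest pos start maze
                  (by simpa [gmOk, h1, h2, h3] using hok)
              exact ⟨S', by rw [hstep, List.foldl_cons, hA]; exact hh⟩

theorem foldl_enumerate_snd {σ : Type} (f : σ → Char → σ) :
    ∀ (cs : List Char) (s : Int) (st : σ),
      (PySem.List.enumerate cs s).foldl (fun a ic => f a ic.2) st = cs.foldl f st := by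
  intro cs
  induction cs with
  | nil => intro s st; simp [PySem.List.enumerate_nil]
  | cons c cs ih => intro s st; simp [PySem.List.enumerate_cons, ih]

-- ===== VERDICT (by name: the statement is the Claim_ definition above) =====
theorem generateMaze_spec : Claim_equal_generateMaze := by
  intro s _ hpre
  unfold Spec_generateMaze generateMaze generateMaze_alt
  obtain ⟨S', hS⟩ := gmParse_top s.toList.length s.toList (Nat.le_refl _) ((0 : Int), (0 : Int))
      ((0 : Int), (0 : Int)) (PySem.Dict.ofList [(((0 : Int), (0 : Int)), "X")]) hpre
  simp only [foldl_enumerate_snd]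
  rw [hS]
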